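-- pv_equiv track=rewrite | github.com/iskaira/rentcontrol | zkbot.py | to_normal_price
-- ===== SOURCE A (Python) =====
-- def to_normal_price(price):
-- 	line=str(price)
-- 	n = 3
-- 	length=len(line)
-- 	t=''
-- 	if length%3==0:
-- 		temp=([line[i:i+n] for i in range(0, len(line), n)])
-- 		for i in temp:
-- 			t+=i+'.'
-- 	if length%3==2:
-- 		temp=([line[i:i+n] for i in range(2, len(line), n)])
-- 		t+=line[:2]+'.'
-- 		for i in temp:
-- 			t+=i+'.'
-- 	if length%3==1:
-- 		temp=([line[i:i+n] for i in range(1, len(line), n)])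
-- 		t+=line[0]+'.'
-- 		for i in temp:
-- 			t+=i+'.'
-- 	return (t[:-1])
-- ===== SOURCE B (Python) =====
-- def to_normal_price(price):
--     s = str(price)
--     parts = []
--     while len(s) > 3:
--         parts.append(s[-3:])
--         s = s[:-3]
--     parts.append(s)
--     return '.'.join(reversed(parts))
-- ===== Notes on version B (the rewrite author's own statement) =====
-- stated objective: idiomatic
-- what changed: Replaced A's three length-mod-3 branches, each building left-to-right slices over a stepped range and joining with a trailing dot that is sliced off, by a single right-to-left loop that peels three-character chunks off the end and one '.'.join of the reversed chunk list.
import Mathlib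
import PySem

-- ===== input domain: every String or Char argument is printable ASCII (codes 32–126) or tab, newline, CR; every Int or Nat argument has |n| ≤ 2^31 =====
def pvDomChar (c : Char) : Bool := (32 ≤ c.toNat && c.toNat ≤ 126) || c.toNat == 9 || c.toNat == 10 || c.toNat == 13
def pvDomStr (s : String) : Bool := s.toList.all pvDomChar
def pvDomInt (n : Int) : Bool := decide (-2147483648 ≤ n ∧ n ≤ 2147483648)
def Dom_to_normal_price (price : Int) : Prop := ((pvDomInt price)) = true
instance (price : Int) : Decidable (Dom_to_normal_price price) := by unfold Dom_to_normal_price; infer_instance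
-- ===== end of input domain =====

-- B replaces A's three length-mod-3 branches (left-to-right stepped-range slicing, trailing
-- dot sliced off) by one right-to-left peel-3 loop and a single '.'.join (objective: idiomatic).

-- ===== PORT A =====
-- A's body after line = str(price), on the character list; t1/t2/t3 are the value of the
-- accumulator t after each of the three sequential if-statements.
def pvA_t1 (line : List Char) : List Char :=
  if PySem.Int.mod (line.length : Int) 3 = 0 then
    (((PySem.List.pyRange 0 line.length 3).map
        (fun i => PySem.List.slice line (some i) (some (i + 3)))).foldl
      (fun t c => t ++ c ++ ['.']) [])
  else []

def pvA_t2 (line : List Char) : List Char :=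
  if PySem.Int.mod (line.length : Int) 3 = 2 then
    (((PySem.List.pyRange 2 line.length 3).map
        (fun i => PySem.List.slice line (some i) (some (i + 3)))).foldl
      (fun t c => t ++ c ++ ['.']) (pvA_t1 line ++ PySem.List.slice line none (some 2) ++ ['.']))
  else pvA_t1 line

def pvA_t3 (line : List Char) : List Char :=
  if PySem.Int.mod (line.length : Int) 3 = 1 then
    (((PySem.List.pyRange 1 line.length 3).map
        (fun i => PySem.List.slice line (some i) (some (i + 3)))).foldl
      (fun t c => t ++ c ++ ['.']) (pvA_t2 line ++ [PySem.List.pyGetD line 0 ' '] ++ ['.']))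
  else pvA_t2 line

def pvA_core (line : List Char) : List Char :=
  PySem.List.slice (pvA_t3 line) none (some (-1))

def to_normal_price (price : Int) : String :=
  String.ofList (pvA_core (PySem.Int.toChars price))

-- ===== PORT B =====
-- B's while loop: peel s[-3:] off the right while len(s) > 3, then append the head
def pvB_peel (s : List Char) (parts : List (List Char)) : List (List Char) :=
  if _h : 3 < s.length then
    pvB_peel (PySem.List.slice s none (some (-3)))
             (parts ++ [PySem.List.slice s (some (-3)) none])
  else parts ++ [s]
termination_by s.length
decreasing_by
  rw [PySem.List.slice_to_neg_ofNat s 3 (by omega)]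
  simp only [List.length_take]; omega

def to_normal_price_alt (price : Int) : String :=
  String.ofList (PySem.Chars.join ['.'] ((pvB_peel (PySem.Int.toChars price) []).reverse))

-- ===== PRECONDITION & SPEC =====
def Spec_to_normal_price (price : Int) (out : String) : Prop := out = to_normal_price_alt price
instance (price : Int) (out : String) : Decidable (Spec_to_normal_price price out) := by unfold Spec_to_normal_price; infer_instance

-- ===== CLAIM (what is proved, stated in full; the proofs are below) =====
def Claim_equal_to_normal_price : Prop := ∀ (price : Int), Dom_to_normal_price price → Spec_to_normal_price price (to_normal_price price)

-- ===== LEMMAS AND PROOFS =====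

-- the common chunk list: greedy 3-chunks from the left
def pvChunks3 (l : List Char) : List (List Char) :=
  if hl : l = [] then [] else l.take 3 :: pvChunks3 (l.drop 3)
termination_by l.length
decreasing_by
  have : 0 < l.length := List.length_pos_iff.mpr hl
  simp only [List.length_drop]; omega

lemma pvChunks3_nil : pvChunks3 [] = [] := by rw [pvChunks3]; simp

lemma pvChunks3_cons (l : List Char) (h : l ≠ []) :
    pvChunks3 l = l.take 3 :: pvChunks3 (l.drop 3) := by
  rw [pvChunks3]; simp [h]

-- the chunk list both programs join with '.': head of size len % 3 (if nonzero), then 3-chunks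
def pvSpecChunks (l : List Char) : List (List Char) :=
  if l.length % 3 = 0 then pvChunks3 l
  else l.take (l.length % 3) :: pvChunks3 (l.drop (l.length % 3))

lemma pvB_peel_gt (s : List Char) (parts : List (List Char)) (h : 3 < s.length) :
    pvB_peel s parts = pvB_peel (PySem.List.slice s none (some (-3)))
      (parts ++ [PySem.List.slice s (some (-3)) none]) := by
  rw [pvB_peel]; exact dif_pos h

lemma pvB_peel_le (s : List Char) (parts : List (List Char)) (h : ¬ 3 < s.length) :
    pvB_peel s parts = parts ++ [s] := by
  rw [pvB_peel]; exact dif_neg h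

lemma pvRange3_cons (a b : Int) (h : a < b) :
    PySem.List.pyRange a b 3 = a :: PySem.List.pyRange (a + 3) b 3 := by
  rw [PySem.List.pyRange_of_pos a b (by norm_num),
      PySem.List.pyRange_of_pos (a + 3) b (by norm_num)]
  have hn : (if a < b then ((b - a + 3 - 1) / 3).toNat else 0) =
      (if a + 3 < b then ((b - (a + 3) + 3 - 1) / 3).toNat else 0) + 1 := by
    split_ifs <;> omega
  rw [hn, List.range_succ_eq_map, List.map_cons, List.map_map]
  refine congrArg₂ _ (by ring) ?_
  refine List.map_congr_left (fun k _ => ?_)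
  simp only [Function.comp]; push_cast; ring

lemma pvMapRange3 (l : List Char) : ∀ (a : Nat),
    (PySem.List.pyRange (a : Int) (l.length : Int) 3).map
        (fun i => PySem.List.slice l (some i) (some (i + 3)))
      = pvChunks3 (l.drop a) := by
  intro a
  by_cases hlt : a < l.length
  · rw [pvRange3_cons _ _ (by exact_mod_cast hlt), List.map_cons]
    have hsl : PySem.List.slice l (some (a : Int)) (some ((a : Int) + 3))
        = (l.drop a).take 3 := by
      have := PySem.List.slice_natCast_add l a 3
      simpa using this
    rw [hsl]
    have h3 : ((a : Int) + 3) = (((a + 3 : Nat)) : Int) := by push_cast; ring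
    rw [h3, pvMapRange3 l (a + 3)]
    have hnil : l.drop a ≠ [] := by
      intro hc
      have := List.drop_eq_nil_iff.mp hc
      omega
    rw [pvChunks3_cons _ hnil, List.drop_drop]
  · have hb : ¬ ((a : Int) < (l.length : Int)) := by
      exact_mod_cast fun hc => hlt (by exact_mod_cast hc)
    rw [PySem.List.pyRange_of_pos _ _ (by norm_num : (0:Int) < 3), if_neg hb]
    rw [List.drop_eq_nil_of_le (Nat.le_of_not_lt hlt), pvChunks3_nil]
    simp
termination_by a => l.length - a

lemma pvJoinDot (cs : List (List Char)) :
    (cs.flatMap (fun c => c ++ ['.'])).dropLast = PySem.Chars.join ['.'] cs := by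
  induction cs with
  | nil => simp [PySem.Chars.join_nil]
  | cons c rest ih =>
    cases rest with
    | nil =>
      rw [PySem.Chars.join_singleton]
      simp [List.dropLast_append_of_ne_nil]
    | cons d rest' =>
      rw [PySem.Chars.join_cons_cons, List.flatMap_cons]
      have hne : (d :: rest').flatMap (fun c => c ++ ['.']) ≠ [] := by
        simp [List.flatMap_cons]
      rw [List.dropLast_append_of_ne_nil hne, ih]

lemma pvFold (cs : List (List Char)) (acc : List Char) :
    cs.foldl (fun t c => t ++ c ++ ['.']) acc = acc ++ cs.flatMap (fun c => c ++ ['.']) := by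
  have hfun : (fun (t c : List Char) => t ++ c ++ ['.'])
      = (fun (t c : List Char) => t ++ (c ++ ['.'])) := by
    funext t c; simp
  rw [hfun, PySem.List.foldl_append_eq_flatMap (fun c : List Char => c ++ ['.']) cs acc]

-- A's core equals the '.'-join of the common chunk list (for nonempty input)
lemma pvA_core_eq (l : List Char) (hne : l ≠ []) :
    pvA_core l = PySem.Chars.join ['.'] (pvSpecChunks l) := by
  have hpos : 0 < l.length := List.length_pos_iff.mpr hne
  have hm : PySem.Int.mod (l.length : Int) 3 = ((l.length % 3 : Nat) : Int) := by
    rw [show (3:Int) = ((3:Nat):Int) from rfl, PySem.Int.mod_natCast]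
  have hr3 : l.length % 3 = 0 ∨ l.length % 3 = 1 ∨ l.length % 3 = 2 := by omega
  unfold pvA_core pvA_t3 pvA_t2 pvA_t1 pvSpecChunks
  rcases hr3 with hr | hr | hr
  · rw [hm, hr,
        if_neg (show ¬((0:Nat):Int) = 1 from by decide),
        if_neg (show ¬((0:Nat):Int) = 2 from by decide),
        if_pos (show ((0:Nat):Int) = 0 from by decide),
        if_pos (show (0:Nat) = 0 from rfl)]
    have h0 := pvMapRange3 l 0
    simp only [Nat.cast_zero] at h0
    rw [h0, List.drop_zero, pvFold, List.nil_append,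
        PySem.List.slice_to_neg_one, pvJoinDot]
  · rw [hm, hr,
        if_pos (show ((1:Nat):Int) = 1 from by decide),
        if_neg (show ¬((1:Nat):Int) = 2 from by decide),
        if_neg (show ¬((1:Nat):Int) = 0 from by decide),
        if_neg (show ¬(1:Nat) = 0 from by decide)]
    have h1 := pvMapRange3 l 1
    simp only [Nat.cast_one] at h1
    rw [h1, pvFold, PySem.List.slice_to_neg_one]
    have hhd : [PySem.List.pyGetD l 0 ' '] = l.take 1 := by
      cases l with
      | nil => exact absurd rfl hne
      | cons c cs => simp [PySem.List.pyGetD_zero_cons]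
    rw [List.nil_append, hhd]
    have hflat : l.take 1 ++ ['.'] ++
          (pvChunks3 (l.drop 1)).flatMap (fun c => c ++ ['.'])
        = (l.take 1 :: pvChunks3 (l.drop 1)).flatMap (fun c => c ++ ['.']) := by
      rw [List.flatMap_cons]
    rw [hflat, pvJoinDot]
  · rw [hm, hr,
        if_neg (show ¬((2:Nat):Int) = 1 from by decide),
        if_pos (show ((2:Nat):Int) = 2 from by decide),
        if_neg (show ¬((2:Nat):Int) = 0 from by decide),
        if_neg (show ¬(2:Nat) = 0 from by decide)]
    have h2 := pvMapRange3 l 2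
    simp only [Nat.cast_ofNat] at h2
    rw [h2, pvFold, PySem.List.slice_to_neg_one]
    have hhd : PySem.List.slice l none (some 2) = l.take 2 := by
      rw [PySem.List.slice_to l (by norm_num : (0:Int) ≤ 2)]
      rfl
    rw [List.nil_append, hhd]
    have hflat : l.take 2 ++ ['.'] ++
          (pvChunks3 (l.drop 2)).flatMap (fun c => c ++ ['.'])
        = (l.take 2 :: pvChunks3 (l.drop 2)).flatMap (fun c => c ++ ['.']) := by
      rw [List.flatMap_cons]
    rw [hflat, pvJoinDot]

-- accumulator lemma for the peel loop
lemma pvB_peel_acc (s : List Char) (parts : List (List Char)) :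
    pvB_peel s parts = parts ++ pvB_peel s [] := by
  by_cases h : 3 < s.length
  · rw [pvB_peel_gt s parts h, pvB_peel_gt s [] h,
        pvB_peel_acc (PySem.List.slice s none (some (-3))),
        pvB_peel_acc (PySem.List.slice s none (some (-3))) ([] ++ _)]
    simp
  · rw [pvB_peel_le s parts h, pvB_peel_le s [] h]
    simp
termination_by s.length
decreasing_by
  all_goals rw [PySem.List.slice_to_neg_ofNat s 3 (by omega)]
  all_goals simp only [List.length_take]; omega

lemma pvChunks3_snoc (d e : List Char) (hd : 3 ∣ d.length) (he : e.length = 3) :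
    pvChunks3 (d ++ e) = pvChunks3 d ++ [e] := by
  by_cases hnil : d = []
  · subst hnil
    have hene : e ≠ [] := by intro hc; rw [hc] at he; simp at he
    rw [List.nil_append, pvChunks3_cons e hene,
        List.take_of_length_le (by omega), List.drop_eq_nil_of_le (by omega),
        pvChunks3_nil]
    simp
  · have hdpos : 0 < d.length := List.length_pos_iff.mpr hnil
    have h3 : 3 ≤ d.length := by omega
    have hne : d ++ e ≠ [] := by simp [hnil]
    rw [pvChunks3_cons _ hne, List.take_append_of_le_length h3,
        List.drop_append_of_le_length h3,
        pvChunks3_snoc (d.drop 3) e (by simp only [List.length_drop]; omega) he,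
        pvChunks3_cons d hnil]
    simp
termination_by d.length
decreasing_by
  simp only [List.length_drop]; omega

lemma pvSpec_snoc (d e : List Char) (he : e.length = 3) :
    pvSpecChunks (d ++ e) = pvSpecChunks d ++ [e] := by
  have hlen : (d ++ e).length = d.length + 3 := by simp [he]
  have hmod : (d ++ e).length % 3 = d.length % 3 := by omega
  have hr : d.length % 3 ≤ d.length := Nat.mod_le _ _
  unfold pvSpecChunks
  rw [hmod]
  by_cases h0 : d.length % 3 = 0
  · rw [if_pos h0, if_pos h0,
        pvChunks3_snoc d e ((Nat.dvd_iff_mod_eq_zero).mpr h0) he]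
  · rw [if_neg h0, if_neg h0, List.take_append_of_le_length hr,
        List.drop_append_of_le_length hr,
        pvChunks3_snoc (d.drop (d.length % 3)) e
          (by simp only [List.length_drop]; omega) he]
    simp

-- B's (reversed) chunk list is the common chunk list (for nonempty input)
lemma pvB_chunks (l : List Char) (hne : l ≠ []) :
    (pvB_peel l []).reverse = pvSpecChunks l := by
  have hpos : 0 < l.length := List.length_pos_iff.mpr hne
  by_cases h : 3 < l.length
  · rw [pvB_peel_gt l [] h, pvB_peel_acc, List.nil_append, List.reverse_append,
        List.reverse_singleton,
        PySem.List.slice_to_neg_ofNat l 3 (by omega),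
        PySem.List.slice_from_neg_ofNat l 3 (by omega)]
    have hlen' : (l.take (l.length - 3)).length = l.length - 3 := by
      simp only [List.length_take]; omega
    have hne' : l.take (l.length - 3) ≠ [] := by
      intro hc; rw [hc] at hlen'; simp at hlen'; omega
    rw [pvB_chunks (l.take (l.length - 3)) hne']
    conv_rhs => rw [show l = l.take (l.length - 3) ++ l.drop (l.length - 3) from
      (List.take_append_drop _ _).symm]
    rw [pvSpec_snoc _ _ (by simp only [List.length_drop]; omega)]
  · rw [pvB_peel_le l [] h, List.nil_append, List.reverse_singleton]
    unfold pvSpecChunks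
    by_cases h0 : l.length % 3 = 0
    · have h3 : l.length = 3 := by omega
      rw [if_pos h0, pvChunks3_cons l hne,
          List.take_of_length_le (by omega), List.drop_eq_nil_of_le (by omega),
          pvChunks3_nil]
    · have hlt : l.length % 3 = l.length := by omega
      rw [if_neg h0, hlt, List.take_length, List.drop_length, pvChunks3_nil]
termination_by l.length
decreasing_by
  simp only [List.length_take]; omega

lemma pvCore_eq (l : List Char) :
    pvA_core l = PySem.Chars.join ['.'] ((pvB_peel l []).reverse) := by
  by_cases hne : l = []
  · subst hne
    rw [pvB_peel_le [] [] (by decide)]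
    decide
  · rw [pvA_core_eq l hne, pvB_chunks l hne]

-- ===== VERDICT (by name: the statement is the Claim_ definition above) =====
theorem to_normal_price_spec : Claim_equal_to_normal_price := by
  intro price _
  unfold Spec_to_normal_price to_normal_price to_normal_price_alt
  rw [pvCore_eq]
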